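-- pv_equiv track=rewrite | github.com/bd4sur/Nano | test_q.py | q_function
-- ===== SOURCE A (Python) =====
-- NUM_DIGITS = 8
--
-- def q_function(number: int) -> int:
--     """
--     Q函数：一串数字中有多少个圈儿。
--         例如：q(2024)=1，q(888)=6
--         出典：https://www.zhihu.com/question/338618946/answer/831919337、https://www.zhihu.com/question/341026031/answer/841578656
--     """
--     #         0  1  2  3  4  5  6  7  8  9  10
--     qv_map = [1, 0, 0, 0, 0, 0, 1, 0, 2, 1, 0]
--     res_map = "0123456789abcdefghijklmnopqrstuvwxyz"
--     istr = f"---------------------------{str(number)}"[-NUM_DIGITS:]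
--     qv = 0
--     for i in range(NUM_DIGITS):
--         d = 10 if istr[i] == "-" else int(istr[i])
--         qv = qv + qv_map[d]
--     return res_map[qv]
-- ===== SOURCE B (Python) =====
-- def q_function(number: int) -> int:
--     """Count the 'circles' in the digit characters of str(number)[-8:] by pure
--     integer arithmetic: peel at most 8 digits off abs(number) with divmod,
--     weight each digit (0,6,9 -> 1, 8 -> 2), and map the total to its base-36
--     character. The minus sign and A's dash padding carry weight 0, so they
--     only matter through how many digits fit in the 8-character window, which
--     this digit loop reproduces exactly."""
--     n = -number if number < 0 else number
--     qv = 0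
--     for _ in range(8):
--         d = n % 10
--         qv += (d == 0) + (d == 6) + 2 * (d == 8) + (d == 9)
--         n //= 10
--         if n == 0:
--             break
--     return chr(48 + qv) if qv < 10 else chr(87 + qv)
-- ===== Notes on version B (the rewrite author's own statement) =====
-- stated objective: alternative
-- what changed: B drops strings entirely: instead of formatting the number into a dash-padded string and summing table lookups per character, it peels at most 8 digits off abs(number) with divmod, weights each digit arithmetically, and computes the result character with chr() arithmetic instead of indexing a result string.
import Mathlib
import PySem

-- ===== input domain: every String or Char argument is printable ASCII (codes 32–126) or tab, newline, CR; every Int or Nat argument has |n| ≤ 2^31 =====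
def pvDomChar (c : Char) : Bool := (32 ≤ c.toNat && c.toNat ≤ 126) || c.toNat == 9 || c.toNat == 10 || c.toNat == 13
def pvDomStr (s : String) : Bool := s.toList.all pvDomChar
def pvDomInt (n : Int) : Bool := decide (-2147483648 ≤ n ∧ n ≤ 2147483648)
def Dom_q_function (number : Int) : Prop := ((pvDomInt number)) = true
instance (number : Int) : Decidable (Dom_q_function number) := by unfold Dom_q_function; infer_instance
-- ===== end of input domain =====

-- B replaces A's dash-padded string formatting + per-character table-lookup loop by a pure
-- arithmetic divmod digit loop over abs(number) with chr() arithmetic for the result character.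


-- ===== PORT A =====
def q_function (number : Int) : String :=
  let qv_map : List Int := [1, 0, 0, 0, 0, 0, 1, 0, 2, 1, 0]
  let res_map : List Char := "0123456789abcdefghijklmnopqrstuvwxyz".toList
  -- f"---------------------------{str(number)}"[-NUM_DIGITS:]
  let istr : List Char :=
    PySem.List.slice ("---------------------------".toList ++ PySem.Int.toChars number)
      (some (-8)) none
  -- for i in range(NUM_DIGITS): d = 10 if istr[i] == "-" else int(istr[i]); qv += qv_map[d]
  -- istr[i], int(istr[i]) and qv_map[d] are always in range/valid here, so the
  -- totalized pyGetD/getD variants are exact.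
  let qv : Int :=
    (PySem.List.pyRange 0 8).foldl
      (fun qv i =>
        let c := PySem.List.pyGetD istr i ' '
        let d : Int := if c = '-' then 10 else (PySem.Int.ofChars? [c]).getD 0
        qv + PySem.List.pyGetD qv_map d 0) 0
  String.ofList [PySem.List.pyGetD res_map qv ' ']

-- ===== PORT B =====
-- weight of one digit d: (d == 0) + (d == 6) + 2 * (d == 8) + (d == 9)
def pvWd (d : Nat) : Int :=
  (if d = 0 then 1 else 0) + (if d = 6 then 1 else 0)
    + 2 * (if d = 8 then 1 else 0) + (if d = 9 then 1 else 0)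

-- 'for _ in range(8): d = n % 10; qv += …; n //= 10; if n == 0: break'
def pvLoopB : Nat → Nat → Int → Int
  | 0, _, qv => qv
  | f + 1, n, qv =>
      let d := n % 10
      let qv' := qv + pvWd d
      let n' := n / 10
      if n' = 0 then qv' else pvLoopB f n' qv'

def q_function_alt (number : Int) : String :=
  -- n = -number if number < 0 else number  (nonnegative, so toNat is exact)
  let n : Nat := (if number < 0 then -number else number).toNat
  let qv : Int := pvLoopB 8 n 0
  -- chr(48 + qv) if qv < 10 else chr(87 + qv)
  if qv < 10 then String.ofList [Char.ofNat (48 + qv).toNat]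
  else String.ofList [Char.ofNat (87 + qv).toNat]

-- ===== PRECONDITION & SPEC =====
def Spec_q_function (number : Int) (out : String) : Prop := out = q_function_alt number
instance (number : Int) (out : String) : Decidable (Spec_q_function number out) := by unfold Spec_q_function; infer_instance

-- ===== CLAIM (what is proved, stated in full; the proofs are below) =====
def Claim_equal_q_function : Prop := ∀ (number : Int), Dom_q_function number → Spec_q_function number (q_function number)

-- ===== LEMMAS AND PROOFS =====

-- A's per-character weight
def pvW (c : Char) : Int :=
  PySem.List.pyGetD [1, 0, 0, 0, 0, 0, 1, 0, 2, 1, 0]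
    (if c = '-' then 10 else (PySem.Int.ofChars? [c]).getD 0) 0

def pvWsum (cs : List Char) : Int := (cs.map pvW).sum

-- the digit-character list of a Nat, most significant first (= Nat.toDigits 10)
def pvD (n : Nat) : List Char :=
  if _h : n < 10 then [Nat.digitChar n]
  else pvD (n / 10) ++ [Nat.digitChar (n % 10)]
  decreasing_by exact Nat.div_lt_self (by omega) (by omega)

lemma pvD_of_lt (n : Nat) (h : n < 10) : pvD n = [Nat.digitChar n] := by
  conv_lhs => rw [pvD]
  rw [dif_pos h]

lemma pvD_of_ge (n : Nat) (h : ¬ n < 10) :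
    pvD n = pvD (n / 10) ++ [Nat.digitChar (n % 10)] := by
  conv_lhs => rw [pvD]
  rw [dif_neg h]

lemma pvD_toDigitsCore (f : Nat) :
    ∀ n acc, n < f → Nat.toDigitsCore 10 f n acc = pvD n ++ acc := by
  induction f with
  | zero => intro n acc h; omega
  | succ f ih =>
    intro n acc h
    simp only [Nat.toDigitsCore]
    by_cases h10 : n < 10
    · rw [Nat.div_eq_of_lt h10, if_pos rfl, pvD_of_lt n h10, Nat.mod_eq_of_lt h10]
      simp
    · have hne : n / 10 ≠ 0 := by omega
      rw [if_neg hne, ih (n / 10) _ (by omega), pvD_of_ge n h10]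
      simp

lemma pvD_toDigits (n : Nat) : Nat.toDigits 10 n = pvD n := by
  simpa using pvD_toDigitsCore (n + 1) n [] (by omega)

lemma pvWsum_append (xs ys : List Char) : pvWsum (xs ++ ys) = pvWsum xs + pvWsum ys := by
  simp [pvWsum]

lemma pvWsum_cons (c : Char) (cs : List Char) : pvWsum (c :: cs) = pvW c + pvWsum cs := by
  simp [pvWsum]

lemma pvW_digitChar (d : Nat) (h : d < 10) : pvW (Nat.digitChar d) = pvWd d := by
  interval_cases d <;> decide

lemma pvFoldl_eq_pvWsum (cs : List Char) (init : Int) :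
    cs.foldl (fun qv c => qv + pvW c) init = init + pvWsum cs := by
  induction cs generalizing init with
  | nil => simp [pvWsum]
  | cons c t ih => rw [List.foldl_cons, ih, pvWsum_cons]; ring

lemma pvDash_wsum (pad : List Char) (hp : ∀ c ∈ pad, c = '-') : pvWsum pad = 0 := by
  induction pad with
  | nil => simp [pvWsum]
  | cons c t ih =>
    rw [pvWsum_cons, hp c List.mem_cons_self,
      ih (fun x hx => hp x (List.mem_cons_of_mem _ hx))]
    decide

-- B's loop computes the weight sum of the last ≤ f digit characters
lemma pvLoopB_eq (f : Nat) :
    ∀ n qv, pvLoopB f n qv = qv + pvWsum ((pvD n).drop ((pvD n).length - f)) := by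
  induction f with
  | zero => intro n qv; simp [pvLoopB, pvWsum]
  | succ f ih =>
    intro n qv
    by_cases h10 : n < 10
    · have hz : n / 10 = 0 := Nat.div_eq_of_lt h10
      simp only [pvLoopB, hz]
      rw [pvD_of_lt n h10, Nat.mod_eq_of_lt h10]
      simp [pvWsum, pvW_digitChar n h10]
    · have hne : n / 10 ≠ 0 := by omega
      simp only [pvLoopB, if_neg hne]
      rw [ih (n / 10) _, pvD_of_ge n h10]
      have hlen : (pvD (n / 10) ++ [Nat.digitChar (n % 10)]).length
          = (pvD (n / 10)).length + 1 := by simp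
      rw [hlen]
      have hdrop : (pvD (n / 10) ++ [Nat.digitChar (n % 10)]).drop
            ((pvD (n / 10)).length + 1 - (f + 1))
          = (pvD (n / 10)).drop ((pvD (n / 10)).length - f)
              ++ [Nat.digitChar (n % 10)] := by
        rw [Nat.succ_sub_succ, List.drop_append_of_le_length (by omega)]
      rw [hdrop, pvWsum_append]
      have hw : pvWsum [Nat.digitChar (n % 10)] = pvWd (n % 10) := by
        simp [pvWsum, pvW_digitChar (n % 10) (Nat.mod_lt _ (by omega))]
      rw [hw]; ring

-- per-character weight bounds
lemma pvWd_bounds (d : Nat) : 0 ≤ pvWd d ∧ pvWd d ≤ 2 := by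
  unfold pvWd; split_ifs <;> omega

lemma pvLoopB_bounds (f : Nat) :
    ∀ n qv, qv ≤ pvLoopB f n qv ∧ pvLoopB f n qv ≤ qv + 2 * f := by
  induction f with
  | zero => intro n qv; simp [pvLoopB]
  | succ f ih =>
    intro n qv
    have hw := pvWd_bounds (n % 10)
    simp only [pvLoopB]
    split_ifs
    · omega
    · have := ih (n / 10) (qv + pvWd (n % 10))
      omega

-- the minus sign weighs 0, so it only shifts which digits fit in the 8-char window
lemma pvWsum_neg_drop (M : List Char) :
    pvWsum (('-' :: M).drop (('-' :: M).length - 8))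
      = pvWsum (M.drop (M.length - 8)) := by
  by_cases h : M.length ≤ 7
  · have h1 : ('-' :: M).length - 8 = 0 := by simp; omega
    have h2 : M.length - 8 = 0 := by omega
    rw [h1, h2, List.drop_zero, List.drop_zero, pvWsum_cons]
    have h0 : pvW '-' = 0 := by decide
    rw [h0]; ring
  · have h1 : ('-' :: M).length - 8 = (M.length - 8) + 1 := by simp; omega
    rw [h1, List.drop_succ_cons]

-- the final character: A's res_map lookup = B's chr arithmetic, for 0 ≤ qv ≤ 16
lemma pvChar_eq (qv : Int) (h0 : 0 ≤ qv) (h16 : qv ≤ 16) :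
    String.ofList [PySem.List.pyGetD "0123456789abcdefghijklmnopqrstuvwxyz".toList qv ' ']
      = (if qv < 10 then String.ofList [Char.ofNat (48 + qv).toNat]
         else String.ofList [Char.ofNat (87 + qv).toNat]) := by
  interval_cases qv <;> decide

-- ===== VERDICT (by name: the statement is the Claim_ definition above) =====
theorem q_function_spec : Claim_equal_q_function := by
  intro number _
  unfold Spec_q_function q_function q_function_alt
  simp only []
  set D : List Char := "---------------------------".toList with hD
  set L : List Char := PySem.Int.toChars number with hL
  set m : Nat := (if number < 0 then -number else number).toNat with hm
  have hDrep : D = List.replicate 27 '-' := by rw [hD]; decide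
  have hDlen : D.length = 27 := by rw [hDrep]; simp
  have hDdash : ∀ c ∈ D, c = '-' := by
    rw [hDrep]; exact fun c hc => List.eq_of_mem_replicate hc
  -- the slice as a drop
  have hslice : PySem.List.slice (D ++ L) (some (-8)) none
      = (D ++ L).drop ((D ++ L).length - 8) :=
    PySem.List.slice_from_neg_ofNat _ 8 (by omega)
  set k : Nat := (D ++ L).length - 8 with hk
  -- istr = dash pad ++ last ≤8 chars of L
  have hk' : k - D.length = L.length - 8 := by
    simp only [hk, List.length_append, hDlen]; omega
  have hsplit : (D ++ L).drop k = D.drop k ++ L.drop (L.length - 8) := by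
    rw [List.drop_append, hk']
  have histrlen : ((D ++ L).drop k).length = 8 := by
    simp only [List.length_drop, hk, List.length_append, hDlen]; omega
  -- A's index loop is the weight-fold over istr
  have hloop :
      (PySem.List.pyRange 0 8).foldl
        (fun qv i =>
          qv + PySem.List.pyGetD [1, 0, 0, 0, 0, 0, 1, 0, 2, 1, 0]
            (if PySem.List.pyGetD ((D ++ L).drop k) i ' ' = '-' then 10
             else (PySem.Int.ofChars? [PySem.List.pyGetD ((D ++ L).drop k) i ' ']).getD 0) 0) 0
      = ((D ++ L).drop k).foldl (fun qv c => qv + pvW c) 0 := by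
    have h8 : (8 : Int) = (PySem.List.len ((D ++ L).drop k) : Int) := by
      simp [PySem.List.len, histrlen]
    rw [h8]
    have := PySem.List.foldl_pyRange_pyGetD ((D ++ L).drop k) ' '
      (fun qv c => qv + pvW c) (0 : Int) (le_refl (0 : Int))
    simp only [pvW] at this
    simpa using this
  -- L's last-≤8 weight sum = the weight sum of abs(number)'s last ≤8 digit chars
  have hLd : pvWsum (L.drop (L.length - 8))
      = pvWsum ((pvD m).drop ((pvD m).length - 8)) := by
    rw [hL]
    unfold PySem.Int.toChars
    by_cases hneg : number < 0
    · rw [if_pos hneg, pvD_toDigits, pvWsum_neg_drop]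
      have : number.natAbs = m := by rw [hm, if_pos hneg]; omega
      rw [this]
    · rw [if_neg hneg, pvD_toDigits]
      have : number.toNat = m := by rw [hm, if_neg hneg]
      rw [this]
  -- B's loop computes the same sum
  have hB : pvLoopB 8 m 0 = pvWsum ((pvD m).drop ((pvD m).length - 8)) := by
    simpa using pvLoopB_eq 8 m 0
  -- assemble, then match the two final-character computations
  rw [hslice, hloop, pvFoldl_eq_pvWsum, hsplit, pvWsum_append,
    pvDash_wsum (D.drop k) (fun c hc => hDdash c (List.mem_of_mem_drop hc)), hLd, ← hB]
  have hbnd := pvLoopB_bounds 8 m 0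
  have := pvChar_eq (pvLoopB 8 m 0) (by omega) (by omega)
  simpa using this
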